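-- pv_equiv track=rewrite | github.com/stat1202/althBack | 백준/Gold/3020. 개똥벌레/개똥벌레.py | solution
-- ===== SOURCE A (Python) =====
-- def solution(N, H, obstacles):
--     stalactites = [0] * (H + 1)
--     stalagmites = [0] * (H + 1)
--
--     for i in range(N):
--         if i % 2 == 0:
--             stalactites[obstacles[i]] += 1
--         else:
--             stalagmites[obstacles[i]] += 1
--
--     for i in range(H - 1, 0, -1):
--         stalactites[i] += stalactites[i + 1]
--         stalagmites[i] += stalagmites[i + 1]
--
--     min_obstacles = N // 2
--     count = 0
--
--     for i in range(1, H + 1):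
--         total_obstacles = stalactites[i] + stalagmites[H - i + 1]
--
--         if total_obstacles < min_obstacles:
--             min_obstacles = total_obstacles
--             count = 1
--         elif total_obstacles == min_obstacles:
--             count += 1
--
--     return min_obstacles, count
-- ===== SOURCE B (Python) =====
-- def solution(N, H, obstacles):
--     # One difference array + a single prefix-sum pass (instead of two
--     # per-height histograms with a suffix-sum pass each).
--     diff = [0] * (H + 2)
--     for j in range(N):
--         h = obstacles[j]
--         if j % 2 == 0:          # stalactite: blocks rows 1..h
--             diff[1] += 1
--             diff[h + 1] -= 1
--         else:                   # stalagmite: blocks rows H-h+1..H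
--             diff[H - h + 1] += 1
--             diff[H + 1] -= 1
--     min_obstacles = N // 2
--     count = 0
--     running = 0
--     for i in range(1, H + 1):
--         running += diff[i]
--         if running < min_obstacles:
--             min_obstacles = running
--             count = 1
--         elif running == min_obstacles:
--             count += 1
--     return min_obstacles, count
-- ===== Notes on version B (the rewrite author's own statement) =====
-- stated objective: alternative
-- what changed: B replaces A's two per-height histogram arrays each followed by a separate suffix-sum pass and a third scan reading both arrays by a single difference array and one prefix-sum pass fused with the min/tie scan.
-- outside the precondition, e.g. on solution(2, 2, [1, -1]): A returns (1, 1), B raises IndexError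
import Mathlib
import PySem

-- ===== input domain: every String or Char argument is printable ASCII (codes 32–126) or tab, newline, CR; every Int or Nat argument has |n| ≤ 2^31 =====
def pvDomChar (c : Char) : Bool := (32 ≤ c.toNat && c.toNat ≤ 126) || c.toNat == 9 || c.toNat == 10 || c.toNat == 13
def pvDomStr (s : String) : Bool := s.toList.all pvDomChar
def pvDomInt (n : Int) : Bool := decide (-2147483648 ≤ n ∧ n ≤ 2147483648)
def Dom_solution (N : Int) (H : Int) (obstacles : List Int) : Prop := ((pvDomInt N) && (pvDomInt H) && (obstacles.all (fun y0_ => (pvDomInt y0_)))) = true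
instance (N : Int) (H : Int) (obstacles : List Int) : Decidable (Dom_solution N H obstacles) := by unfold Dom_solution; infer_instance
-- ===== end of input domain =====

-- B replaces A's two histogram arrays with two suffix-sum passes by ONE difference
-- array and a single prefix-sum pass fused with the min/tie scan (alternative
-- decomposition, same O(N+H) cost).

-- ===== PORT A =====
-- a[i] += c  (exact for in-range i; Pre_ keeps every index in range, Python raises otherwise)
def pvBump (a : List Int) (i : Int) (c : Int) : List Int :=
  PySem.List.pySetD a i (PySem.List.pyGetD a i 0 + c)

-- body of A's first loop: route obstacles[i] into stalactites (even i) or stalagmites (odd i)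
def pvStepA1 (obs : List Int) (st : List Int × List Int) (i : Int) : List Int × List Int :=
  if PySem.Int.mod i 2 == 0 then (pvBump st.1 (PySem.List.pyGetD obs i 0) 1, st.2)
  else (st.1, pvBump st.2 (PySem.List.pyGetD obs i 0) 1)

-- body of A's second loop: in-place suffix sums, a[i] += a[i+1]
def pvStepA2 (st : List Int × List Int) (i : Int) : List Int × List Int :=
  (pvBump st.1 i (PySem.List.pyGetD st.1 (i + 1) 0),
   pvBump st.2 i (PySem.List.pyGetD st.2 (i + 1) 0))

-- body of A's third loop: track minimum and its multiplicity
def pvStepA3 (H : Int) (ct mg : List Int) (st : Int × Int) (i : Int) : Int × Int :=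
  let total := PySem.List.pyGetD ct i 0 + PySem.List.pyGetD mg (H - i + 1) 0
  if total < st.1 then (total, 1)
  else if total == st.1 then (st.1, st.2 + 1)
  else st

def solution (N : Int) (H : Int) (obstacles : List Int) : Int × Int :=
  let p1 := (PySem.List.pyRange 0 N 1).foldl (pvStepA1 obstacles)
      (PySem.List.pyRepeat [0] (H + 1), PySem.List.pyRepeat [0] (H + 1))
  let p2 := (PySem.List.pyRange (H - 1) 0 (-1)).foldl pvStepA2 p1
  (PySem.List.pyRange 1 (H + 1) 1).foldl (pvStepA3 H p2.1 p2.2) (PySem.Int.floordiv N 2, 0)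

-- ===== PORT B =====
-- body of B's first loop: difference-array updates for one obstacle
def pvStepB1 (obs : List Int) (H : Int) (d : List Int) (j : Int) : List Int :=
  let h := PySem.List.pyGetD obs j 0
  if PySem.Int.mod j 2 == 0 then pvBump (pvBump d 1 1) (h + 1) (-1)
  else pvBump (pvBump d (H - h + 1) 1) (H + 1) (-1)

-- body of B's second loop: running prefix sum fused with the min/tie scan
def pvStepB2 (d : List Int) (st : Int × Int × Int) (i : Int) : Int × Int × Int :=
  let running := st.2.2 + PySem.List.pyGetD d i 0
  if running < st.1 then (running, 1, running)
  else if running == st.1 then (st.1, st.2.1 + 1, running)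
  else (st.1, st.2.1, running)

def solution_alt (N : Int) (H : Int) (obstacles : List Int) : Int × Int :=
  let d := (PySem.List.pyRange 0 N 1).foldl (pvStepB1 obstacles H)
      (PySem.List.pyRepeat [0] (H + 2))
  let r := (PySem.List.pyRange 1 (H + 1) 1).foldl (pvStepB2 d) (PySem.Int.floordiv N 2, 0, 0)
  (r.1, r.2.1)

-- ===== PRECONDITION & SPEC =====
-- Pre_ restricts to the task's natural domain: at least N obstacle heights, each used height
-- between 0 and H (and 0 ≤ H whenever some obstacle is read).  A raises IndexError on heights
-- above H and on N > len(obstacles); on negative heights A returns a value only through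
-- Python's negative-index wraparound, a quirk B's difference array does not share (B raises).
def Pre_solution (N : Int) (H : Int) (obstacles : List Int) : Prop :=
  N ≤ (obstacles.length : Int) ∧ (0 ≤ H ∨ N ≤ 0) ∧
    ∀ h ∈ obstacles.take N.toNat, 0 ≤ h ∧ h ≤ H
instance (N : Int) (H : Int) (obstacles : List Int) : Decidable (Pre_solution N H obstacles) := by
  unfold Pre_solution; infer_instance

def pvWitness_solution : Int × Int × List Int := (4, 3, [1, 2, 3, 0])

def Spec_solution (N : Int) (H : Int) (obstacles : List Int) (out : Int × Int) : Prop := out = solution_alt N H obstacles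
instance (N : Int) (H : Int) (obstacles : List Int) (out : Int × Int) : Decidable (Spec_solution N H obstacles out) := by unfold Spec_solution; infer_instance

-- ===== CLAIM (what is proved, stated in full; the proofs are below) =====
def Claim_equal_solution : Prop := ∀ (N : Int) (H : Int) (obstacles : List Int), Dom_solution N H obstacles → Pre_solution N H obstacles → Spec_solution N H obstacles (solution N H obstacles)

-- ===== LEMMAS AND PROOFS =====

-- indexing facts (in-range, nonnegative indices only — exactly the situation Pre_ guarantees)
theorem pvGet_oob (a : List Int) (j : Int) (h : (a.length : Int) ≤ j) :
    PySem.List.pyGetD a j 0 = 0 := by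
  apply PySem.List.pyGetD_of_none
  rw [PySem.List.pyGet?_eq_none_iff]
  unfold PySem.Raise.InRange
  omega

theorem pvGet_zeros (n : Nat) (m : Int) :
    PySem.List.pyGetD (List.replicate n (0 : Int)) m 0 = 0 := by
  by_cases h : PySem.Raise.InRange (List.replicate n (0 : Int)).length m
  · exact List.eq_of_mem_replicate (PySem.List.pyGetD_mem _ 0 h)
  · exact PySem.List.pyGetD_of_none _ _ _ ((PySem.List.pyGet?_eq_none_iff _ _).2 h)

theorem pvGet_bump (a : List Int) (i j c : Int) (hi0 : 0 ≤ i) (hil : i < (a.length : Int))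
    (hj : 0 ≤ j) :
    PySem.List.pyGetD (pvBump a i c) j 0 =
      PySem.List.pyGetD a j 0 + (if j = i then c else 0) := by
  unfold pvBump
  have hi' : i = ((i.toNat : Nat) : Int) := (Int.toNat_of_nonneg hi0).symm
  have hj' : j = ((j.toNat : Nat) : Int) := (Int.toNat_of_nonneg hj).symm
  rw [hi', hj',
    PySem.List.pyGetD_pySetD_natCast a i.toNat j.toNat _ 0 (by omega)]
  by_cases h : j.toNat = i.toNat
  · rw [if_pos h, if_pos (show ((j.toNat : Nat) : Int) = ((i.toNat : Nat) : Int) by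
      exact_mod_cast h), h]
  · rw [if_neg h, if_neg (show ¬ ((j.toNat : Nat) : Int) = ((i.toNat : Nat) : Int) from
      fun hh => h (by exact_mod_cast hh)), add_zero]

theorem pvLen_bump (a : List Int) (i c : Int) : (pvBump a i c).length = a.length := by
  unfold pvBump; exact PySem.List.length_pySetD a i _

-- ---- A side: histogram characterisation ----

-- single-array view of A's first loop (component p of pvStepA1)
def pvHistStep (obs : List Int) (p : Bool) (a : List Int) (j : Int) : List Int :=
  if (PySem.Int.mod j 2 == 0) == p then pvBump a (PySem.List.pyGetD obs j 0) 1 else a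

theorem stepA1_split (obs : List Int) :
    pvStepA1 obs = fun st i => (pvHistStep obs true st.1 i, pvHistStep obs false st.2 i) := by
  funext st i
  unfold pvStepA1 pvHistStep
  cases hb : (PySem.Int.mod i 2 == 0) <;> rfl

theorem hist_len (obs : List Int) (p : Bool) (r : List Int) :
    ∀ a : List Int, (r.foldl (pvHistStep obs p) a).length = a.length := by
  induction r with
  | nil => intro a; rfl
  | cons j r ih =>
    intro a
    simp only [List.foldl_cons]
    rw [ih]
    unfold pvHistStep
    split <;> simp [pvLen_bump]

theorem hist_get (obs : List Int) (p : Bool) (r : List Int) :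
    ∀ a : List Int,
      (∀ j ∈ r, 0 ≤ PySem.List.pyGetD obs j 0 ∧ PySem.List.pyGetD obs j 0 < (a.length : Int)) →
      ∀ k, 0 ≤ k →
      PySem.List.pyGetD (r.foldl (pvHistStep obs p) a) k 0 =
        PySem.List.pyGetD a k 0 +
          ((r.countP (fun j => ((PySem.Int.mod j 2 == 0) == p) && (PySem.List.pyGetD obs j 0 == k))) : Int) := by
  induction r with
  | nil => intro a _ k _; simp
  | cons j r ih =>
    intro a hb k hk
    have hbj := hb j (by simp)
    simp only [List.foldl_cons, List.countP_cons]
    cases hp : ((PySem.Int.mod j 2 == 0) == p) with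
    | true =>
      have hstep : pvHistStep obs p a j = pvBump a (PySem.List.pyGetD obs j 0) 1 := by
        unfold pvHistStep; rw [if_pos hp]
      rw [hstep, ih _ (by intro x hx; rw [pvLen_bump]; exact hb x (by simp [hx])) k hk,
        pvGet_bump a _ k 1 hbj.1 hbj.2 hk, Bool.true_and]
      push_cast
      by_cases he : PySem.List.pyGetD obs j 0 = k
      · rw [if_pos he.symm, if_pos (by rw [he]; exact beq_self_eq_true k)]
        ring
      · rw [if_neg (fun hh => he hh.symm), if_neg (by
          intro hh
          exact he (by exact_mod_cast (beq_iff_eq ..).1 hh))]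
        ring
    | false =>
      have hstep : pvHistStep obs p a j = a := by
        unfold pvHistStep
        rw [if_neg (by rw [hp]; exact Bool.false_ne_true)]
      rw [hstep, ih _ (by intro x hx; exact hb x (by simp [hx])) k hk, Bool.false_and,
        if_neg Bool.false_ne_true, Nat.add_zero]

-- ---- A side: suffix pass characterisation ----

def pvSufStep (a : List Int) (i : Int) : List Int :=
  pvBump a i (PySem.List.pyGetD a (i + 1) 0)

theorem stepA2_split :
    pvStepA2 = fun (st : List Int × List Int) i => (pvSufStep st.1 i, pvSufStep st.2 i) := rfl

-- mathematical suffix sum  Σ_{m=k}^{H} a[m]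
def pvSuf (a : List Int) (H k : Int) : Int :=
  ((PySem.List.pyRange k (H + 1) 1).map (fun m => PySem.List.pyGetD a m 0)).sum

theorem pvSuf_oob (a : List Int) (H k : Int) (h : H < k) : pvSuf a H k = 0 := by
  unfold pvSuf; rw [PySem.List.pyRange_one_eq_nil (by omega)]; rfl

theorem pvSuf_step (a : List Int) (H k : Int) (h : k ≤ H) :
    pvSuf a H k = PySem.List.pyGetD a k 0 + pvSuf a H (k + 1) := by
  unfold pvSuf; rw [PySem.List.pyRange_one_cons (by omega)]; simp

theorem suf_fold (H : Int) :
    ∀ (tn : Nat) (t : Int), t = (tn : Int) → t ≤ H - 1 →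
    ∀ (a g : List Int), (a.length : Int) = H + 1 →
      (∀ k, 0 ≤ k → k ≤ t → PySem.List.pyGetD a k 0 = PySem.List.pyGetD g k 0) →
      (∀ k, t < k → PySem.List.pyGetD a k 0 = pvSuf g H k) →
      ∀ k, 1 ≤ k →
        PySem.List.pyGetD ((PySem.List.pyRange t 0 (-1)).foldl pvSufStep a) k 0 = pvSuf g H k := by
  intro tn
  induction tn with
  | zero =>
    intro t ht _ a g _ _ hhi k hk
    rw [PySem.List.pyRange_neg_one_eq_nil (by omega)]
    exact hhi k (by omega)
  | succ n ih =>
    intro t ht htH a g hlen hlo hhi k hk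
    have ht1 : (1 : Int) ≤ t := by omega
    rw [PySem.List.pyRange_neg_one_cons (by omega)]
    simp only [List.foldl_cons]
    have hget : PySem.List.pyGetD a (t + 1) 0 = pvSuf g H (t + 1) := hhi (t + 1) (by omega)
    have hstep : pvSufStep a t = pvBump a t (pvSuf g H (t + 1)) := by
      unfold pvSufStep; rw [hget]
    rw [hstep]
    apply ih (t - 1) (by omega) (by omega) _ g (by simp [pvLen_bump, hlen])
    · intro m hm0 hm
      rw [pvGet_bump a t m _ (by omega) (by omega) hm0, if_neg (by omega), add_zero]
      exact hlo m hm0 (by omega)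
    · intro m hm
      by_cases hmt : m = t
      · subst hmt
        rw [pvGet_bump a m m _ (by omega) (by omega) (by omega), if_pos rfl,
          hlo m (by omega) (by omega), pvSuf_step g H m (by omega)]
      · rw [pvGet_bump a t m _ (by omega) (by omega) (by omega), if_neg hmt, add_zero]
        exact hhi m (by omega)
    · exact hk

-- ---- counting identities ----

theorem count_ge_split (r : List Int) (q : Int → Bool) (o : Int → Int) (k : Int) :
    r.countP (fun j => q j && decide (k ≤ o j)) =
      r.countP (fun j => q j && (o j == k)) + r.countP (fun j => q j && decide (k + 1 ≤ o j)) := by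
  induction r with
  | nil => rfl
  | cons j r ih =>
    simp only [List.countP_cons, ih]
    by_cases hq : q j
    · by_cases he : o j = k
      · simp [hq, he]; omega
      · by_cases hlt : k ≤ o j
        · simp [hq, he, hlt, show k + 1 ≤ o j by omega]; omega
        · simp [hq, he, hlt, show ¬ (k + 1 ≤ o j) by omega]
    · simp [hq]

theorem count_ge_top (r : List Int) (q : Int → Bool) (o : Int → Int) (H : Int)
    (hb : ∀ j ∈ r, o j ≤ H) :
    r.countP (fun j => q j && decide (H + 1 ≤ o j)) = 0 := by
  rw [List.countP_eq_zero]
  intro j hj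
  have hj' := hb j hj
  simp [show ¬ (H + 1 ≤ o j) by omega]

theorem suf_hist (obs : List Int) (N H : Int) (p : Bool) (hH : 0 ≤ H)
    (hb : ∀ j ∈ PySem.List.pyRange 0 N 1,
      0 ≤ PySem.List.pyGetD obs j 0 ∧ PySem.List.pyGetD obs j 0 ≤ H) :
    ∀ (dn : Nat) (k : Int), H + 1 - k = (dn : Int) → 1 ≤ k →
      pvSuf ((PySem.List.pyRange 0 N 1).foldl (pvHistStep obs p)
          (List.replicate (H + 1).toNat 0)) H k =
        (((PySem.List.pyRange 0 N 1).countP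
            (fun j => ((PySem.Int.mod j 2 == 0) == p) && decide (k ≤ PySem.List.pyGetD obs j 0))) : Int) := by
  intro dn
  induction dn with
  | zero =>
    intro k hdk hk
    rw [pvSuf_oob _ _ _ (by omega), show k = H + 1 by omega,
      count_ge_top _ _ _ H (fun j hj => (hb j hj).2)]
    simp
  | succ n ih =>
    intro k hdk hk
    have hkH : k ≤ H := by omega
    have hlen : ((List.replicate (H + 1).toNat (0 : Int)).length : Int) = H + 1 := by
      simp; omega
    rw [pvSuf_step _ _ _ hkH,
      hist_get obs p _ _ (by
        intro j hj
        refine ⟨(hb j hj).1, ?_⟩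
        rw [hlen]; exact lt_of_le_of_lt (hb j hj).2 (by omega)) k (by omega),
      pvGet_zeros, ih (k + 1) (by omega) (by omega),
      count_ge_split (PySem.List.pyRange 0 N 1) _ (fun j => PySem.List.pyGetD obs j 0) k]
    push_cast
    ring

-- the Bool predicate "obstacle j blocks row i"
def pvCov (H : Int) (obs : List Int) (i : Int) (j : Int) : Bool :=
  if PySem.Int.mod j 2 == 0 then decide (i ≤ PySem.List.pyGetD obs j 0)
  else decide (H - i + 1 ≤ PySem.List.pyGetD obs j 0)

-- number of obstacles blocking row i
def pvTot (N H : Int) (obs : List Int) (i : Int) : Int :=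
  (((PySem.List.pyRange 0 N 1).countP (pvCov H obs i)) : Int)

theorem count_merge (r : List Int) (c A B : Int → Bool) :
    r.countP (fun j => (c j == true) && A j) + r.countP (fun j => (c j == false) && B j) =
      r.countP (fun j => if c j then A j else B j) := by
  induction r with
  | nil => rfl
  | cons j r ih =>
    simp only [List.countP_cons]
    cases hcj : c j
    · have h1 : ((false == true) : Bool) = false := rfl
      have h2 : ((false == false) : Bool) = true := rfl
      rw [h1, h2, Bool.false_and, Bool.true_and, if_neg Bool.false_ne_true,
        if_neg Bool.false_ne_true]
      omega
    · have h1 : ((true == true) : Bool) = true := rfl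
      have h2 : ((true == false) : Bool) = false := rfl
      rw [h1, h2, Bool.true_and, Bool.false_and, if_neg Bool.false_ne_true, if_pos rfl]
      omega

-- the generic min/tie scan both programs end with
def pvSel (tot : Int → Int) (st : Int × Int) (i : Int) : Int × Int :=
  if tot i < st.1 then (tot i, 1)
  else if tot i == st.1 then (st.1, st.2 + 1)
  else st

theorem stepA3_eq_sel (H : Int) (ct mg : List Int) :
    pvStepA3 H ct mg =
      pvSel (fun i => PySem.List.pyGetD ct i 0 + PySem.List.pyGetD mg (H - i + 1) 0) := rfl

-- A's row total equals the blocking count, for every row 1 ≤ i ≤ H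
theorem A_tot (obs : List Int) (N H : Int)
    (hb : ∀ j ∈ PySem.List.pyRange 0 N 1,
      0 ≤ PySem.List.pyGetD obs j 0 ∧ PySem.List.pyGetD obs j 0 ≤ H)
    (i : Int) (hi1 : 1 ≤ i) (hiH : i ≤ H) :
    PySem.List.pyGetD
        ((PySem.List.pyRange (H - 1) 0 (-1)).foldl pvSufStep
          ((PySem.List.pyRange 0 N 1).foldl (pvHistStep obs true)
            (List.replicate (H + 1).toNat 0))) i 0 +
      PySem.List.pyGetD
        ((PySem.List.pyRange (H - 1) 0 (-1)).foldl pvSufStep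
          ((PySem.List.pyRange 0 N 1).foldl (pvHistStep obs false)
            (List.replicate (H + 1).toNat 0))) (H - i + 1) 0 = pvTot N H obs i := by
  have hH : (0 : Int) ≤ H := by omega
  have hH1 : (1 : Int) ≤ H := by omega
  have hlen0 : ((List.replicate (H + 1).toNat (0 : Int)).length : Int) = H + 1 := by simp; omega
  have hbound : ∀ j ∈ PySem.List.pyRange 0 N 1,
      0 ≤ PySem.List.pyGetD obs j 0 ∧
        PySem.List.pyGetD obs j 0 < ((List.replicate (H + 1).toNat (0 : Int)).length : Int) := by
    intro j hj; exact ⟨(hb j hj).1, by rw [hlen0]; exact lt_of_le_of_lt (hb j hj).2 (by omega)⟩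
  have key : ∀ (p : Bool) (k : Int), 1 ≤ k → k ≤ H + 1 →
      PySem.List.pyGetD
          ((PySem.List.pyRange (H - 1) 0 (-1)).foldl pvSufStep
            ((PySem.List.pyRange 0 N 1).foldl (pvHistStep obs p)
              (List.replicate (H + 1).toNat 0))) k 0 =
        (((PySem.List.pyRange 0 N 1).countP
            (fun j => ((PySem.Int.mod j 2 == 0) == p) && decide (k ≤ PySem.List.pyGetD obs j 0))) : Int) := by
    intro p k hk hkup
    set g := (PySem.List.pyRange 0 N 1).foldl (pvHistStep obs p)
      (List.replicate (H + 1).toNat 0) with hg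
    have hglen : (g.length : Int) = H + 1 := by
      rw [hg, hist_len]; exact hlen0
    rw [suf_fold H (H - 1).toNat (H - 1) (by omega) (by omega) g g hglen
        (fun _ _ _ => rfl)
        (by
          intro m hm
          by_cases hmH : m = H
          · rw [hmH, pvSuf_step g H H (le_refl H), pvSuf_oob g H (H + 1) (by omega)]
            omega
          · rw [pvGet_oob g m (by omega), pvSuf_oob g H m (by omega)])
        k hk]
    exact suf_hist obs N H p hH hb (H + 1 - k).toNat k (by omega) hk
  rw [key true i hi1 (by omega), key false (H - i + 1) (by omega) (by omega)]
  unfold pvTot pvCov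
  exact_mod_cast count_merge (PySem.List.pyRange 0 N 1)
    (fun j => PySem.Int.mod j 2 == 0)
    (fun j => decide (i ≤ PySem.List.pyGetD obs j 0))
    (fun j => decide (H - i + 1 ≤ PySem.List.pyGetD obs j 0))

-- ---- B side: prefix sums of the difference array ----

def pvPre (d : List Int) (i : Int) : Int :=
  ((PySem.List.pyRange 1 (i + 1) 1).map (fun m => PySem.List.pyGetD d m 0)).sum

theorem pvPre_zero (d : List Int) (i : Int) (h : i ≤ 0) : pvPre d i = 0 := by
  unfold pvPre; rw [PySem.List.pyRange_one_eq_nil (by omega)]; rfl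

theorem pvPre_succ (d : List Int) (i : Int) (h : 1 ≤ i) :
    pvPre d i = pvPre d (i - 1) + PySem.List.pyGetD d i 0 := by
  unfold pvPre
  rw [show i + 1 = (i - 1) + 1 + 1 by ring]
  rw [PySem.List.pyRange_one_succ_right (by omega)]
  simp [show i - 1 + 1 = i by ring]

theorem pvPre_replicate (n : Nat) (i : Int) : pvPre (List.replicate n (0 : Int)) i = 0 := by
  unfold pvPre
  apply List.sum_eq_zero
  intro x hx
  rcases List.mem_map.1 hx with ⟨m, _, hm⟩
  rw [← hm, pvGet_zeros]

theorem pvPre_bump (d : List Int) (m c : Int) (hm0 : 0 ≤ m) (hml : m < (d.length : Int)) :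
    ∀ (n : Nat) (i : Int), i = (n : Int) →
      pvPre (pvBump d m c) i = pvPre d i + (if 1 ≤ m ∧ m ≤ i then c else 0) := by
  intro n
  induction n with
  | zero =>
    intro i hi
    rw [pvPre_zero _ _ (by omega), pvPre_zero _ _ (by omega), if_neg (by omega)]
    ring
  | succ n ih =>
    intro i hi
    have h1 : (1 : Int) ≤ i := by omega
    rw [pvPre_succ _ _ h1, pvPre_succ d _ h1, ih (i - 1) (by omega),
      pvGet_bump d m i c hm0 hml (by omega)]
    by_cases he : i = m
    · rw [if_pos he, if_neg (by omega), if_pos (by omega)]; ring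
    · rw [if_neg he]
      split_ifs <;> omega

theorem diff_pre (obs : List Int) (H : Int) (r : List Int) :
    ∀ d : List Int,
      (∀ j ∈ r, 0 ≤ PySem.List.pyGetD obs j 0 ∧ PySem.List.pyGetD obs j 0 ≤ H) →
      (d.length : Int) = H + 2 →
      ∀ i, 1 ≤ i → i ≤ H →
      pvPre (r.foldl (pvStepB1 obs H) d) i =
        pvPre d i + ((r.countP (pvCov H obs i)) : Int) := by
  induction r with
  | nil => intro d _ _ i _ _; simp
  | cons j r ih =>
    intro d hb hlen i hi1 hiH
    have hbj := hb j (by simp)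
    have hH1 : (1 : Int) ≤ H := by omega
    simp only [List.foldl_cons, List.countP_cons]
    have hstep : pvPre (pvStepB1 obs H d j) i =
        pvPre d i + (if pvCov H obs i j then 1 else 0) := by
      unfold pvStepB1 pvCov
      cases hp : (PySem.Int.mod j 2 == 0) with
      | true =>
        rw [if_pos rfl, if_pos rfl]
        rw [pvPre_bump (pvBump d 1 1) (PySem.List.pyGetD obs j 0 + 1) (-1) (by omega)
            (by rw [pvLen_bump]; omega) i.toNat i (by omega),
          pvPre_bump d 1 1 (by omega) (by omega) i.toNat i (by omega)]
        simp only [decide_eq_true_eq]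
        split_ifs <;> omega
      | false =>
        rw [if_neg Bool.false_ne_true, if_neg Bool.false_ne_true]
        rw [pvPre_bump (pvBump d (H - PySem.List.pyGetD obs j 0 + 1) 1) (H + 1) (-1) (by omega)
            (by rw [pvLen_bump]; omega) i.toNat i (by omega),
          pvPre_bump d (H - PySem.List.pyGetD obs j 0 + 1) 1 (by omega) (by omega) i.toNat i (by omega)]
        simp only [decide_eq_true_eq]
        split_ifs <;> omega
    rw [ih (pvStepB1 obs H d j) (fun x hx => hb x (by simp [hx]))
        (by
          have hl : (pvStepB1 obs H d j).length = d.length := by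
            unfold pvStepB1; split <;> simp [pvLen_bump]
          rw [hl]; exact hlen) i hi1 hiH, hstep]
    push_cast
    by_cases hc : pvCov H obs i j <;> ring

-- B's fused loop = the generic scan over prefix sums, carrying the running sum
theorem B_run (d : List Int) :
    ∀ (n : Nat) (t : Int), t = (n : Int) → ∀ (m c : Int),
      (PySem.List.pyRange 1 (t + 1) 1).foldl (pvStepB2 d) (m, c, 0) =
        (((PySem.List.pyRange 1 (t + 1) 1).foldl (pvSel (pvPre d)) (m, c)).1,
         ((PySem.List.pyRange 1 (t + 1) 1).foldl (pvSel (pvPre d)) (m, c)).2,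
         pvPre d t) := by
  intro n
  induction n with
  | zero =>
    intro t ht m c
    rw [PySem.List.pyRange_one_eq_nil (by omega), pvPre_zero d t (by omega)]
    rfl
  | succ n ih =>
    intro t ht m c
    have h1 : (1 : Int) ≤ t := by omega
    rw [PySem.List.pyRange_one_append 1 t (t + 1) h1 (by omega),
      PySem.List.pyRange_one_singleton, List.foldl_append, List.foldl_append,
      show PySem.List.pyRange 1 t 1 = PySem.List.pyRange 1 ((t - 1) + 1) 1 by rw [show t - 1 + 1 = t by ring],
      ih (t - 1) (by omega) m c]
    simp only [List.foldl_cons, List.foldl_nil]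
    have hrun : pvPre d (t - 1) + PySem.List.pyGetD d t 0 = pvPre d t :=
      (pvPre_succ d t h1).symm
    unfold pvStepB2 pvSel
    simp only [hrun]
    split_ifs <;> rfl

-- ---- assembly ----

theorem main_eq (N H : Int) (obstacles : List Int) (hpre : Pre_solution N H obstacles) :
    solution N H obstacles = solution_alt N H obstacles := by
  obtain ⟨hN, hHN, hball⟩ := hpre
  by_cases hH : 0 ≤ H
  · -- obstacle bounds in the form the lemmas use
    have hb : ∀ j ∈ PySem.List.pyRange 0 N 1,
        0 ≤ PySem.List.pyGetD obstacles j 0 ∧ PySem.List.pyGetD obstacles j 0 ≤ H := by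
      intro j hj
      rcases PySem.List.mem_pyRange_one.1 hj with ⟨hj0, hjN⟩
      have hjl : j < (obstacles.length : Int) := lt_of_lt_of_le hjN hN
      rw [PySem.List.pyGetD_eq_getElem obstacles 0 hj0 hjl]
      apply hball
      have hjn : j.toNat < (obstacles.take N.toNat).length := by simp; omega
      have heq : (obstacles.take N.toNat)[j.toNat]'hjn = obstacles[j.toNat]'(by omega) :=
        List.getElem_take
      rw [← heq]
      exact List.getElem_mem _
    have hrep : PySem.List.pyRepeat [(0 : Int)] (H + 1) = List.replicate (H + 1).toNat 0 :=
      PySem.List.pyRepeat_singleton 0 (H + 1)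
    -- A's program, routed through the generic scan
    have hA : solution N H obstacles =
        (PySem.List.pyRange 1 (H + 1) 1).foldl (pvSel (pvTot N H obstacles))
          (PySem.Int.floordiv N 2, 0) := by
      simp only [solution]
      rw [stepA1_split, hrep,
        PySem.List.foldl_prod_mk (pvHistStep obstacles true) (pvHistStep obstacles false),
        stepA2_split,
        PySem.List.foldl_prod_mk pvSufStep pvSufStep]
      rw [stepA3_eq_sel]
      apply PySem.List.foldl_congr_mem
      intro acc i hi
      rcases PySem.List.mem_pyRange_one.1 hi with ⟨hi1, hiH⟩
      unfold pvSel
      simp only []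
      simp only [A_tot obstacles N H hb i hi1 (by omega)]
    -- B's program, routed through the same scan
    have hrep2 : PySem.List.pyRepeat [(0 : Int)] (H + 2) = List.replicate (H + 2).toNat 0 :=
      PySem.List.pyRepeat_singleton 0 (H + 2)
    have hd : ∀ i, 1 ≤ i → i ≤ H →
        pvPre ((PySem.List.pyRange 0 N 1).foldl (pvStepB1 obstacles H)
          (List.replicate (H + 2).toNat 0)) i = pvTot N H obstacles i := by
      intro i h1 h2
      rw [diff_pre obstacles H _ _ hb (by simp; omega) i h1 h2, pvPre_replicate]
      unfold pvTot
      ring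
    have hB : solution_alt N H obstacles =
        (PySem.List.pyRange 1 (H + 1) 1).foldl (pvSel (pvTot N H obstacles))
          (PySem.Int.floordiv N 2, 0) := by
      simp only [solution_alt, hrep2]
      rw [B_run _ H.toNat H (by omega)]
      simp only [Prod.mk.eta]
      apply PySem.List.foldl_congr_mem
      intro acc i hi
      rcases PySem.List.mem_pyRange_one.1 hi with ⟨hi1, hiH⟩
      unfold pvSel
      rw [hd i hi1 (by omega)]
    rw [hA, hB]
  · -- H < 0 : Pre_ forces N ≤ 0, all three loops are empty in both programs
    have hN0 : N ≤ 0 := by rcases hHN with h | h <;> omega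
    simp [solution, solution_alt,
      PySem.List.pyRange_one_eq_nil (show N ≤ 0 from hN0),
      PySem.List.pyRange_one_eq_nil (show H + 1 ≤ 1 by omega),
      PySem.List.pyRange_neg_one_eq_nil (show H - 1 ≤ 0 by omega)]

-- ===== VERDICT (by name: the statement is the Claim_ definition above) =====
theorem solution_spec : Claim_equal_solution := by
  intro N H obstacles _ hpre
  unfold Spec_solution
  exact main_eq N H obstacles hpre
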